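-- pv_equiv track=rewrite | github.com/pengjichengbest/Algorithm | new_problem.py | minOperationsMaxProfit
-- ===== SOURCE A (Python) =====
-- def minOperationsMaxProfit(customers, boardingCost, runningCost):
--     rest = 0
--     profit = 0
--     record = []
--     for i in range(len(customers)):
--         if rest + customers[i] > 4:
--             profit += 4 * boardingCost - runningCost
--             rest = rest + customers[i] - 4
--         else:
--             profit += (rest + customers[i]) * boardingCost - runningCost
--             rest = 0
--         record.append(profit)
--     while rest > 0:
--         if rest > 4:
--             profit += 4 * boardingCost - runningCost
--             rest -= 4
--         else:
--             profit += rest * boardingCost - runningCost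
--             rest = 0
--         record.append(profit)
--     times = -1
--     maxV = -1
--     for i in range(len(record)):
--         if record[i] > maxV:
--             maxV = record[i]
--             times = i + 1
--     return times if maxV > 0 else -1
-- ===== SOURCE B (Python) =====
-- def minOperationsMaxProfit(customers, boardingCost, runningCost):
--     # Customer phase: single pass, running argmax (first index of maximum).
--     profit = 0
--     rest = 0
--     maxV = -1
--     times = -1
--     n = 0
--     for c in customers:
--         n += 1
--         take = rest + c
--         if take > 4:
--             take = 4
--         profit += take * boardingCost - runningCost
--         rest = rest + c - take
--         if profit > maxV:
--             maxV = profit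
--             times = n
--     # Tail phase in closed form: profits form an arithmetic progression of q full
--     # rotations (step = 4*boardingCost - runningCost) plus one partial rotation;
--     # only the endpoints of the progression can be a first maximum.
--     if rest > 0:
--         step = 4 * boardingCost - runningCost
--         q, rem = divmod(rest, 4)
--         cands = []
--         if q >= 1:
--             cands.append((n + 1, profit + step))
--             if q >= 2:
--                 cands.append((n + q, profit + q * step))
--         if rem > 0:
--             cands.append((n + q + 1, profit + q * step + rem * boardingCost - runningCost))
--         for idx, v in cands:
--             if v > maxV:
--                 maxV = v
--                 times = idx
--     return times if maxV > 0 else -1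
-- ===== Notes on version B (the rewrite author's own statement) =====
-- stated objective: faster
-- what changed: The leftover-passenger while-loop (one iteration per 4 boarded, i.e. O(sum(customers)/4)) is replaced by a closed-form argmax over the arithmetic progression of leftover-phase profits: only its two endpoints and the final partial rotation can be a first maximum, so B evaluates at most three candidates after a single O(n) customer pass that tracks the running argmax.
import Mathlib
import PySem

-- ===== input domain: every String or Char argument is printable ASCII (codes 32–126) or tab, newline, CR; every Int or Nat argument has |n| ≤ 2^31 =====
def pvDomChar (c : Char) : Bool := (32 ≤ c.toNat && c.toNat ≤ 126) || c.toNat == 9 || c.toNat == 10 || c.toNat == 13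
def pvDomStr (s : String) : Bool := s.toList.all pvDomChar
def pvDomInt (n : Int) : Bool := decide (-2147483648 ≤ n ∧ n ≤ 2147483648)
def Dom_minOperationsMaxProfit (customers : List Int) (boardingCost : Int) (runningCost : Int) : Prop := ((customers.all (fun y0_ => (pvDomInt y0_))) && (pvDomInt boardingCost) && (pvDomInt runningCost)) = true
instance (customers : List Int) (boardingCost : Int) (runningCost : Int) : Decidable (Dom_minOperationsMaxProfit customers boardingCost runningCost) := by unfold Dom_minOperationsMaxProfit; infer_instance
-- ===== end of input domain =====

-- B replaces A's one-rotation-at-a-time leftover loop (O(sum(customers)/4) iterations)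
-- by a closed-form arithmetic-progression argmax over at most three candidate rotations: faster (asymptotic).

-- ===== PORT A =====
-- one iteration of A's `for i in range(len(customers))` loop; state = (rest, profit, record)
def pvAStep (bc rc : Int) (st : Int × Int × List Int) (c : Int) : Int × Int × List Int :=
  match st with
  | (rest, profit, record) =>
    if rest + c > 4 then
      (rest + c - 4, profit + 4 * bc - rc, record ++ [profit + 4 * bc - rc])
    else
      (0, profit + (rest + c) * bc - rc, record ++ [profit + (rest + c) * bc - rc])

-- A's `while rest > 0` loop; `record.append(...)` is ported as cons onto a reversed
-- accumulator (reversed once by the caller), so that evaluation stays linear and tail-recursive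
def pvAWhile (bc rc rest profit : Int) (acc : List Int) : List Int :=
  if _h : rest > 0 then
    if _h4 : rest > 4 then
      pvAWhile bc rc (rest - 4) (profit + 4 * bc - rc) ((profit + 4 * bc - rc) :: acc)
    else (profit + rest * bc - rc) :: acc
  else acc
termination_by rest.toNat
decreasing_by omega

-- one iteration of A's `for i in range(len(record))` argmax loop, ported as a fold carrying
-- the loop index; state = (maxV, times, i)
def pvAScanStep (s : Int × Int × Int) (v : Int) : Int × Int × Int :=
  if v > s.1 then (v, s.2.2 + 1, s.2.2 + 1) else (s.1, s.2.1, s.2.2 + 1)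

def minOperationsMaxProfit (customers : List Int) (boardingCost : Int) (runningCost : Int) : Int :=
  let s := customers.foldl (pvAStep boardingCost runningCost) (0, 0, [])
  let record := s.2.2 ++ (pvAWhile boardingCost runningCost s.1 s.2.1 []).reverse
  let mt := record.foldl pvAScanStep (-1, -1, 0)
  if mt.1 > 0 then mt.2.1 else -1

-- ===== PORT B =====
-- one iteration of B's customer loop; state = (profit, rest, maxV, times, n)
def pvBStep (bc rc : Int) (st : Int × Int × Int × Int × Int) (c : Int) : Int × Int × Int × Int × Int :=
  match st with
  | (profit, rest, maxV, times, n) =>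
    let n' := n + 1
    let take0 := rest + c
    let take := if take0 > 4 then 4 else take0
    let profit' := profit + take * bc - rc
    let rest' := rest + c - take
    if profit' > maxV then (profit', rest', profit', n', n') else (profit', rest', maxV, times, n')

-- B's candidate list `cands` for the leftover phase
def pvBCands (bc rc profit n q rem step : Int) : List (Int × Int) :=
  (if q ≥ 1 then
     [(n + 1, profit + step)] ++ (if q ≥ 2 then [(n + q, profit + q * step)] else [])
   else []) ++
  (if rem > 0 then [(n + q + 1, profit + q * step + rem * bc - rc)] else [])

def minOperationsMaxProfit_alt (customers : List Int) (boardingCost : Int) (runningCost : Int) : Int :=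
  let s := customers.foldl (pvBStep boardingCost runningCost) (0, 0, -1, -1, 0)
  let profit := s.1
  let rest := s.2.1
  let maxV := s.2.2.1
  let times := s.2.2.2.1
  let n := s.2.2.2.2
  let mt :=
    if rest > 0 then
      let step := 4 * boardingCost - runningCost
      let q := PySem.Int.floordiv rest 4
      let rem := PySem.Int.mod rest 4
      (pvBCands boardingCost runningCost profit n q rem step).foldl
        (fun (mt : Int × Int) iv => if iv.2 > mt.1 then (iv.2, iv.1) else mt) (maxV, times)
    else (maxV, times)
  if mt.1 > 0 then mt.2 else -1

-- ===== PRECONDITION & SPEC =====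
def Spec_minOperationsMaxProfit (customers : List Int) (boardingCost : Int) (runningCost : Int) (out : Int) : Prop := out = minOperationsMaxProfit_alt customers boardingCost runningCost
instance (customers : List Int) (boardingCost : Int) (runningCost : Int) (out : Int) : Decidable (Spec_minOperationsMaxProfit customers boardingCost runningCost out) := by unfold Spec_minOperationsMaxProfit; infer_instance

-- ===== CLAIM (what is proved, stated in full; the proofs are below) =====
def Claim_equal_minOperationsMaxProfit : Prop := ∀ (customers : List Int) (boardingCost : Int) (runningCost : Int), Dom_minOperationsMaxProfit customers boardingCost runningCost → Spec_minOperationsMaxProfit customers boardingCost runningCost (minOperationsMaxProfit customers boardingCost runningCost)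

-- ===== LEMMAS AND PROOFS =====

-- final (rest, profit) after the customer phase
def pvSim (bc rc : Int) : Int → Int → List Int → Int × Int
  | rest, profit, [] => (rest, profit)
  | rest, profit, c :: cs =>
    if rest + c > 4 then pvSim bc rc (rest + c - 4) (profit + 4 * bc - rc) cs
    else pvSim bc rc 0 (profit + (rest + c) * bc - rc) cs

-- profits recorded during the customer phase
def pvProfits (bc rc : Int) : Int → Int → List Int → List Int
  | _, _, [] => []
  | rest, profit, c :: cs =>
    if rest + c > 4 then (profit + 4 * bc - rc) :: pvProfits bc rc (rest + c - 4) (profit + 4 * bc - rc) cs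
    else (profit + (rest + c) * bc - rc) :: pvProfits bc rc 0 (profit + (rest + c) * bc - rc) cs

-- running argmax (first index of a strict improvement), index k is the position of the next element
def pvScan : Int × Int → Int → List Int → Int × Int
  | mt, _, [] => mt
  | mt, k, v :: l => pvScan (if v > mt.1 then (v, k + 1) else mt) (k + 1) l

-- arithmetic progression P+step, P+2*step, …, P+q*step
def pvAP (P step : Int) : Nat → List Int
  | 0 => []
  | k + 1 => (P + step) :: pvAP (P + step) step k

lemma pvAP_length (P step : Int) (q : Nat) : (pvAP P step q).length = q := by
  induction q generalizing P with
  | zero => rfl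
  | succ k ih => simp [pvAP, ih]

lemma pvProfits_length (bc rc : Int) (cs : List Int) : ∀ rest profit,
    (pvProfits bc rc rest profit cs).length = cs.length := by
  induction cs with
  | nil => intro rest profit; rfl
  | cons c cs ih =>
    intro rest profit
    simp only [pvProfits]
    split_ifs <;> simp [ih]

lemma pvAStep_foldl (bc rc : Int) (cs : List Int) : ∀ rest profit rec,
    cs.foldl (pvAStep bc rc) (rest, profit, rec) =
      ((pvSim bc rc rest profit cs).1, (pvSim bc rc rest profit cs).2,
        rec ++ pvProfits bc rc rest profit cs) := by
  induction cs with
  | nil => intro rest profit rec; simp [pvSim, pvProfits]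
  | cons c cs ih =>
    intro rest profit rec
    simp only [List.foldl_cons, pvAStep, pvSim, pvProfits]
    split_ifs with h <;> rw [ih] <;> simp

lemma pvBStep_foldl (bc rc : Int) (cs : List Int) : ∀ rest profit m t n,
    cs.foldl (pvBStep bc rc) (profit, rest, m, t, n) =
      ((pvSim bc rc rest profit cs).2, (pvSim bc rc rest profit cs).1,
        (pvScan (m, t) n (pvProfits bc rc rest profit cs)).1,
        (pvScan (m, t) n (pvProfits bc rc rest profit cs)).2,
        n + cs.length) := by
  induction cs with
  | nil => intro rest profit m t n; simp [pvSim, pvProfits, pvScan]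
  | cons c cs ih =>
    intro rest profit m t n
    simp only [List.foldl_cons, pvBStep, pvSim, pvProfits]
    split_ifs with h h2 h3
    · rw [ih]; simp [pvScan, h2, Prod.mk.injEq]; omega
    · rw [ih]; simp [pvScan, h2, Prod.mk.injEq]; omega
    · rw [ih]; simp [pvScan, h3, Prod.mk.injEq]; omega
    · rw [ih]; simp [pvScan, h3, Prod.mk.injEq]; omega

lemma pvScan_append (l1 l2 : List Int) : ∀ (mt : Int × Int) (k : Int),
    pvScan mt k (l1 ++ l2) = pvScan (pvScan mt k l1) (k + l1.length) l2 := by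
  induction l1 with
  | nil => intro mt k; simp [pvScan]
  | cons v l ih =>
    intro mt k
    simp only [List.cons_append, pvScan, ih, List.length_cons]
    congr 1
    push_cast; ring

lemma pvScan_no (l : List Int) : ∀ (m t k : Int), (∀ v ∈ l, ¬ v > m) → pvScan (m, t) k l = (m, t) := by
  induction l with
  | nil => intro m t k _; rfl
  | cons v l ih =>
    intro m t k hall
    simp only [pvScan, if_neg (hall v (by simp))]
    exact ih m t (k + 1) fun w hw => hall w (by simp [hw])

lemma pvAP_le (step : Int) (hs : step ≤ 0) (q : Nat) : ∀ (P v : Int), v ∈ pvAP P step q → v ≤ P + step := by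
  induction q with
  | zero => intro P v hv; simp [pvAP] at hv
  | succ k ih =>
    intro P v hv
    simp only [pvAP, List.mem_cons] at hv
    rcases hv with rfl | hv
    · exact le_refl _
    · have := ih (P + step) v hv
      omega

lemma pvScan_AP_nonpos (step : Int) (hs : step ≤ 0) (q : Nat) (hq : 1 ≤ q) (P m t k : Int) :
    pvScan (m, t) k (pvAP P step q) = if P + step > m then (P + step, k + 1) else (m, t) := by
  obtain ⟨q', rfl⟩ : ∃ q', q = q' + 1 := ⟨q - 1, by omega⟩
  simp only [pvAP, pvScan]
  split_ifs with h
  · exact pvScan_no _ _ _ _ fun v hv => by have := pvAP_le step hs q' (P + step) v hv; omega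
  · exact pvScan_no _ _ _ _ fun v hv => by have := pvAP_le step hs q' (P + step) v hv; omega

lemma pvScan_AP_pos (step : Int) (hs : 0 < step) : ∀ (q : Nat), 1 ≤ q → ∀ (P m t k : Int),
    pvScan (m, t) k (pvAP P step q) =
      if P + (q : Int) * step > m then (P + (q : Int) * step, k + (q : Int)) else (m, t) := by
  intro q
  induction q with
  | zero => omega
  | succ q' ih =>
    intro _ P m t k
    by_cases hq' : 1 ≤ q'
    · have hq1 : (1:Int) ≤ (q' : Int) := by exact_mod_cast hq'
      have hlt : P + step < P + ((q' : Int) + 1) * step := by nlinarith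
      have key : P + step + (q' : Int) * step = P + ((q' : Int) + 1) * step := by ring
      have hrel : ((q' : Int) + 1) * step = (q' : Int) * step + step := by ring
      simp only [pvAP, pvScan]
      by_cases h : P + step > m
      · simp only [if_pos h]
        rw [ih hq', key]
        push_cast
        rw [if_pos (by linarith : P + ((q' : Int) + 1) * step > P + step),
            if_pos (by linarith : P + ((q' : Int) + 1) * step > m)]
        simp only [Prod.mk.injEq]
        constructor <;> push_cast <;> ring
      · simp only [if_neg h]
        rw [ih hq', key]
        push_cast
        split_ifs with h2
        · simp only [Prod.mk.injEq]
          constructor <;> push_cast <;> ring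
        · rfl
    · have hz : q' = 0 := by omega
      subst hz
      simp only [pvAP, pvScan]
      push_cast
      norm_num

lemma pvAWhile_nonpos (bc rc rest profit : Int) (acc : List Int) (h : ¬ rest > 0) :
    pvAWhile bc rc rest profit acc = acc := by
  rw [pvAWhile]
  simp [h]

lemma pvAWhile_char (bc rc : Int) : ∀ (fuel : Nat) (rest profit : Int) (acc : List Int),
    rest.toNat ≤ fuel → 0 < rest →
    pvAWhile bc rc rest profit acc =
      (pvAP profit (4 * bc - rc) ((rest / 4).toNat) ++
        (if rest % 4 > 0 then [profit + rest / 4 * (4 * bc - rc) + rest % 4 * bc - rc] else [])).reverse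
        ++ acc := by
  intro fuel
  induction fuel with
  | zero => intro rest profit acc hf hr; omega
  | succ f ih =>
    intro rest profit acc hf hr
    rw [pvAWhile]
    rw [dif_pos hr]
    by_cases h4 : rest > 4
    · rw [dif_pos h4]
      rw [ih (rest - 4) (profit + 4 * bc - rc) _ (by omega) (by omega)]
      have e1 : (rest - 4) / 4 = rest / 4 - 1 := by omega
      have e2 : (rest - 4) % 4 = rest % 4 := by omega
      have e3 : (rest / 4).toNat = ((rest / 4 - 1).toNat) + 1 := by omega
      rw [e1, e2, e3]
      have eAP : pvAP profit (4 * bc - rc) ((rest / 4 - 1).toNat + 1) =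
          (profit + (4 * bc - rc)) :: pvAP (profit + (4 * bc - rc)) (4 * bc - rc) ((rest / 4 - 1).toNat) := rfl
      rw [eAP]
      have eP : profit + 4 * bc - rc = profit + (4 * bc - rc) := by ring
      have eV : profit + 4 * bc - rc + (rest / 4 - 1) * (4 * bc - rc) + rest % 4 * bc - rc =
          profit + rest / 4 * (4 * bc - rc) + rest % 4 * bc - rc := by ring
      rw [eV, eP]
      simp
    · rw [dif_neg h4]
      by_cases hq : rest = 4
      · subst hq
        norm_num [pvAP]
        ring
      · have hq0 : rest / 4 = 0 := by omega
        have hr4 : rest % 4 = rest := by omega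
        rw [hq0, hr4]
        have h0 : (0:Int).toNat = 0 := rfl
        rw [h0]
        simp only [pvAP, if_pos hr]
        have : profit + 0 * (4 * bc - rc) + rest * bc - rc = profit + rest * bc - rc := by ring
        rw [this]
        simp

lemma pvAScan_foldl (record : List Int) : ∀ (m t k : Int),
    record.foldl pvAScanStep (m, t, k) =
      ((pvScan (m, t) k record).1, (pvScan (m, t) k record).2, k + record.length) := by
  induction record with
  | nil => intro m t k; simp [pvScan]
  | cons v l ih =>
    intro m t k
    simp only [List.foldl_cons, pvAScanStep, pvScan]
    split_ifs with h
    · rw [ih]; simp [Prod.mk.injEq]; omega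
    · rw [ih]; simp [Prod.mk.injEq]; omega

lemma pvTail_scan (bc rc rest profit m t n : Int) (hr : 0 < rest) :
    pvScan (m, t) n
        (pvAP profit (4 * bc - rc) ((rest / 4).toNat) ++
          (if rest % 4 > 0 then [profit + rest / 4 * (4 * bc - rc) + rest % 4 * bc - rc] else [])) =
      (pvBCands bc rc profit n (rest / 4) (rest % 4) (4 * bc - rc)).foldl
        (fun (mt : Int × Int) iv => if iv.2 > mt.1 then (iv.2, iv.1) else mt) (m, t) := by
  have hq0 : 0 ≤ rest / 4 := by omega
  by_cases h1 : (1:Int) ≤ rest / 4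
  · have hcast : (((rest / 4).toNat : Nat) : Int) = rest / 4 := Int.toNat_of_nonneg hq0
    rw [pvScan_append, pvAP_length, hcast]
    have final : ∀ S : Int × Int,
        pvScan S (n + rest / 4)
            (if rest % 4 > 0 then [profit + rest / 4 * (4 * bc - rc) + rest % 4 * bc - rc] else []) =
          (if rest % 4 > 0 then
              [(n + rest / 4 + 1, profit + rest / 4 * (4 * bc - rc) + rest % 4 * bc - rc)]
            else []).foldl
            (fun (mt : Int × Int) iv => if iv.2 > mt.1 then (iv.2, iv.1) else mt) S := by
      intro S
      split_ifs with h <;> simp [pvScan]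
    simp only [pvBCands, if_pos h1, List.foldl_append]
    rw [final]
    congr 1
    by_cases h2 : (2:Int) ≤ rest / 4
    · simp only [if_pos h2, List.foldl_cons, List.foldl_nil]
      by_cases hstep : 0 < 4 * bc - rc
      · rw [pvScan_AP_pos _ hstep _ (by omega), hcast]
        have hprod : 0 < (rest / 4 - 1) * (4 * bc - rc) := mul_pos (by omega) hstep
        have hv : rest / 4 * (4 * bc - rc) = (rest / 4 - 1) * (4 * bc - rc) + (4 * bc - rc) := by
          ring
        split_ifs
        all_goals first | rfl | (exfalso; linarith [hprod, hv])
      · rw [pvScan_AP_nonpos _ (by omega) _ (by omega)]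
        have hprod : (rest / 4 - 1) * (4 * bc - rc) ≤ 0 :=
          mul_nonpos_of_nonneg_of_nonpos (by omega) (by omega)
        have hv : rest / 4 * (4 * bc - rc) = (rest / 4 - 1) * (4 * bc - rc) + (4 * bc - rc) := by
          ring
        split_ifs
        all_goals first | rfl | (exfalso; linarith [hprod, hv])
    · have hq1 : rest / 4 = 1 := by omega
      rw [hq1] at hcast ⊢
      simp only [if_neg (by norm_num : ¬ (2:Int) ≤ 1), List.foldl_cons, List.foldl_nil]
      norm_num [pvAP, pvScan]
  · have hq : rest / 4 = 0 := by omega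
    have hrem : rest % 4 > 0 := by omega
    rw [hq]
    simp only [pvBCands, if_neg (by norm_num : ¬ (0:Int) ≥ 1), if_pos hrem]
    norm_num [pvAP, pvScan]

theorem minOperationsMaxProfit_spec : Claim_equal_minOperationsMaxProfit := by
  intro customers bc rc _dom
  unfold Spec_minOperationsMaxProfit
  unfold minOperationsMaxProfit minOperationsMaxProfit_alt
  simp only [pvAStep_foldl bc rc customers 0 0 [], pvBStep_foldl bc rc customers 0 0 (-1) (-1) 0,
    List.nil_append]
  set R := (pvSim bc rc 0 0 customers).1 with hRdef
  set P := (pvSim bc rc 0 0 customers).2 with hPdef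
  set pr := pvProfits bc rc 0 0 customers with hprdef
  set S := pvScan (-1, -1) 0 pr with hSdef
  by_cases h : R > 0
  · rw [pvAWhile_char bc rc R.toNat R P [] le_rfl h]
    rw [List.append_nil, List.reverse_reverse]
    rw [pvAScan_foldl]
    rw [pvScan_append]
    rw [if_pos h]
    rw [PySem.Int.floordiv_eq_ediv_of_pos (by norm_num), PySem.Int.mod_eq_emod_of_pos (by norm_num)]
    have hlen : ((pr.length : Nat) : Int) = ((customers.length : Nat) : Int) := by
      rw [hprdef, pvProfits_length]
    rw [show S = (S.1, S.2) from (Prod.mk.eta).symm]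
    rw [pvTail_scan bc rc R P S.1 S.2 (0 + ((pr.length : Nat) : Int)) h]
    rw [hlen]
  · rw [pvAWhile_nonpos _ _ _ _ _ h]
    rw [List.reverse_nil, List.append_nil, pvAScan_foldl, if_neg h, Prod.mk.eta]
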